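-- pv_equiv track=rewrite | github.com/GoIT-Python/goit-python-setup | module-5/task1.py | real_len
-- ===== SOURCE A (Python) =====
-- def real_len(text):
--     len = 0
--     for i in text:
--         if i in ["\n", "\f", "\r", "\t", "\v"]:
--             continue
--         else:
--             len += 1
--     return len
-- ===== SOURCE B (Python) =====
-- def real_len(text):
--     return len(text) - sum(text.count(c) for c in "\n\f\r\t\v")
-- ===== Notes on version B (the rewrite author's own statement) =====
-- stated objective: idiomatic
-- what changed: B replaces A's per-character membership loop with complement counting: the total length minus the sum of str.count over the five excluded control characters.
import Mathlib
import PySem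

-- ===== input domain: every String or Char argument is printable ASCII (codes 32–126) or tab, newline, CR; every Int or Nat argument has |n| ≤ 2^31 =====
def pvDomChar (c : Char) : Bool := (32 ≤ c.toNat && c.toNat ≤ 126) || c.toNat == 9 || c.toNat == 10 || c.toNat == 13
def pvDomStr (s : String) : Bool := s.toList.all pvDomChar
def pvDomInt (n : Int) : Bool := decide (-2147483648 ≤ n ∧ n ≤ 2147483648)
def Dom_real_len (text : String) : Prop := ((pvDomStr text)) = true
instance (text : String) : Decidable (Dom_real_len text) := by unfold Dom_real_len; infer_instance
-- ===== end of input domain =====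

-- B counts the complement (length minus counts of the five control chars) instead of A's per-character membership loop; objective: idiomatic.

-- ===== PORT A =====
def real_len (text : String) : Int :=
  text.toList.foldl
    (fun len i => if i ∈ ['\n', '\x0c', '\r', '\t', '\x0b'] then len else len + 1) 0

-- ===== PORT B =====
def real_len_alt (text : String) : Int :=
  (PySem.Str.len text : Int) -
    ("\n\x0c\r\t\x0b".toList.map
      (fun c => (PySem.Str.count text (String.singleton c) : Int))).sum

-- ===== PRECONDITION & SPEC =====
def Spec_real_len (text : String) (out : Int) : Prop := out = real_len_alt text
instance (text : String) (out : Int) : Decidable (Spec_real_len text out) := by unfold Spec_real_len; infer_instance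

-- ===== CLAIM (what is proved, stated in full; the proofs are below) =====
def Claim_equal_real_len : Prop := ∀ (text : String), Dom_real_len text → Spec_real_len text (real_len text)

-- ===== LEMMAS AND PROOFS =====

-- PySem.Chars.count with a one-character needle is List.count (PySem ships no lemma for this case)
theorem count_go_singleton (c : Char) :
    ∀ (l : List Char) (fuel acc : Nat), l.length ≤ fuel →
      PySem.Chars.count.go [c] fuel l acc = acc + l.count c := by
  intro l
  induction l with
  | nil => intro fuel acc _; cases fuel <;> simp [PySem.Chars.count.go]
  | cons h t ih =>
    intro fuel acc hf
    cases fuel with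
    | zero => simp at hf
    | succ n =>
      simp only [PySem.Chars.count.go]
      by_cases hc : h = c
      · subst hc
        simp only [List.isPrefixOf, List.isPrefixOf_nil_left, beq_self_eq_true, Bool.and_true,
          if_pos, List.length_cons, List.drop_succ_cons, List.length_nil, List.drop_zero]
        rw [ih n (acc + 1) (by simpa using hf)]
        simp [List.count_cons]
        omega
      · have : ([c].isPrefixOf (h :: t)) = false := by
          simp [List.isPrefixOf]
          exact fun hh => absurd hh.symm hc
        rw [this]
        simp only [Bool.false_eq_true, if_false]
        rw [ih n acc (by simpa using Nat.le_of_succ_le_succ hf)]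
        simp [List.count_cons, hc]

theorem count_singleton (s : List Char) (c : Char) :
    PySem.Chars.count s [c] = s.count c := by
  simp only [PySem.Chars.count, List.isEmpty_cons, Bool.false_eq_true, if_false]
  simpa using count_go_singleton c s s.length 0 (le_refl _)

theorem foldl_A (bad : List Char) :
    ∀ (l : List Char) (acc : Int),
      l.foldl (fun len i => if i ∈ bad then len else len + 1) acc
        = acc + (l.countP (fun i => !decide (i ∈ bad)) : Int) := by
  intro l
  induction l with
  | nil => intro acc; simp
  | cons h t ih =>
    intro acc
    by_cases hm : h ∈ bad <;>
      simp [List.foldl_cons, List.countP_cons, hm, ih] <;> ring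

theorem counts_sum (l : List Char) :
    ((l.count '\n' : Int) + l.count '\x0c' + l.count '\r' + l.count '\t' + l.count '\x0b')
      = (l.countP (fun i => decide (i ∈ ['\n', '\x0c', '\r', '\t', '\x0b'])) : Int) := by
  induction l with
  | nil => simp
  | cons h t ih =>
    simp only [List.count_cons, List.countP_cons]
    by_cases h1 : h = '\n' <;> by_cases h2 : h = '\x0c' <;> by_cases h3 : h = '\r' <;>
      by_cases h4 : h = '\t' <;> by_cases h5 : h = '\x0b' <;>
      simp_all <;> push_cast <;> omega

theorem countP_not_add (l : List Char) (p : Char → Bool) :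
    (l.countP (fun i => !(p i)) : Int) = l.length - l.countP p := by
  have h := List.length_eq_countP_add_countP p (l := l)
  have h2 : l.countP (fun i => !(p i)) = l.countP (fun i => ¬ p i = true) := by
    simp
  omega

-- ===== VERDICT (by name: the statement is the Claim_ definition above) =====
theorem real_len_spec : Claim_equal_real_len := by
  intro text _
  unfold Spec_real_len real_len real_len_alt
  rw [foldl_A]
  simp only [PySem.Str.len_eq, PySem.Chars.len_eq, PySem.Str.count]
  have hl : "\n\x0c\r\t\x0b".toList = ['\n', '\x0c', '\r', '\t', '\x0b'] := by decide
  have : ("\n\x0c\r\t\x0b".toList.map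
      (fun c => (PySem.Chars.count text.toList (String.singleton c).toList : Int))).sum
      = ((text.toList.count '\n' : Int) + text.toList.count '\x0c' + text.toList.count '\r'
          + text.toList.count '\t' + text.toList.count '\x0b') := by
    rw [hl]
    simp only [List.map_cons, List.map_nil, List.sum_cons, List.sum_nil, String.toList_singleton,
      count_singleton]
    ring
  rw [this, counts_sum, countP_not_add]
  simp
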